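-- pv_equiv track=rewrite | github.com/pris0n-jpg/xenmpm | example/analyze_rgb_compare_intermediate.py | _phase_to_frames
-- ===== SOURCE A (Python) =====
-- from typing import Dict, List, Optional, Sequence, Tuple
--
-- def _phase_to_frames(available_frames: Sequence[int], frame_to_phase: Sequence[str]) -> Dict[str, List[int]]:
--     by_phase: Dict[str, List[int]] = {}
--     for frame in available_frames:
--         if frame < 0 or frame >= len(frame_to_phase):
--             continue
--         phase = frame_to_phase[frame] or ""
--         by_phase.setdefault(phase, []).append(frame)
--     return by_phase
-- ===== SOURCE B (Python) =====
-- def _phase_to_frames(available_frames, frame_to_phase):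
--     n = len(frame_to_phase)
--     valid = [f for f in available_frames if 0 <= f < n]
--     keys = list(dict.fromkeys(frame_to_phase[f] or "" for f in valid))
--     return {k: [f for f in valid if (frame_to_phase[f] or "") == k] for k in keys}
-- ===== Notes on version B (the rewrite author's own statement) =====
-- stated objective: alternative
-- what changed: Replaces the single-pass dict setdefault/append grouping with: filter the valid frames once, compute the first-appearance-ordered list of distinct phase keys, then build each group by a separate filter pass per key; this trades A's one-pass O(n) for a clearer per-key O(n*k) decomposition.
import Mathlib
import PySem

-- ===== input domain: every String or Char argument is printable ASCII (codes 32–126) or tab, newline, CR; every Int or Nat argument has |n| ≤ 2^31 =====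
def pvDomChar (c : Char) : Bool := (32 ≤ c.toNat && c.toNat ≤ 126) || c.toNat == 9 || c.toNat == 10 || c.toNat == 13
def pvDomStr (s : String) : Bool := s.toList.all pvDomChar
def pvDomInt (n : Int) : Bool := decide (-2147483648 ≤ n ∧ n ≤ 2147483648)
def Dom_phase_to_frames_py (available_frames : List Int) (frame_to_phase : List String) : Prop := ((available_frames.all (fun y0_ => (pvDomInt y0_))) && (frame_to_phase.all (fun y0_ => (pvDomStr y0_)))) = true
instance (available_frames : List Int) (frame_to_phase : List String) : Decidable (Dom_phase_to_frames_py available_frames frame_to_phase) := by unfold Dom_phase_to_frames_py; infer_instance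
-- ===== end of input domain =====

-- B groups the valid frames by first filtering them once, listing the distinct phase keys in
-- first-appearance order, and building each group with a separate filter pass per key
-- (alternative decomposition; same cost class as A's setdefault/append loop).

-- ===== PORT A =====
-- A: one pass over available_frames; skip out-of-range frames; by_phase.setdefault(phase, []).append(frame)
-- (= Dict.modify phase [] (· ++ [frame])); return the dict (as its items list).
def phase_to_frames_py (available_frames : List Int) (frame_to_phase : List String) : List (String × List Int) :=
  (available_frames.foldl (fun by_phase frame =>
      if frame < 0 ∨ frame ≥ (frame_to_phase.length : Int) then by_phase
      else
        let p := PySem.List.pyGetD frame_to_phase frame ""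
        let phase := if p = "" then "" else p          -- frame_to_phase[frame] or ""
        by_phase.modify phase [] (fun l => l ++ [frame]))
    (PySem.Dict.empty : PySem.Dict String (List Int))).items

-- ===== PORT B =====
-- helper of B: the phase key of a valid frame, 'frame_to_phase[f] or ""'
def pvKey (frame_to_phase : List String) (f : Int) : String :=
  let p := PySem.List.pyGetD frame_to_phase f ""
  if p = "" then "" else p

def phase_to_frames_py_alt (available_frames : List Int) (frame_to_phase : List String) : List (String × List Int) :=
  let n : Int := frame_to_phase.length
  let valid := available_frames.filter (fun f => 0 ≤ f && f < n)
  let keys := PySem.List.dedup (valid.map (pvKey frame_to_phase))   -- dict.fromkeys order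
  keys.map (fun k => (k, valid.filter (fun f => pvKey frame_to_phase f == k)))

-- ===== PRECONDITION & SPEC =====
def Spec_phase_to_frames_py (available_frames : List Int) (frame_to_phase : List String) (out : List (String × List Int)) : Prop := out = phase_to_frames_py_alt available_frames frame_to_phase
instance (available_frames : List Int) (frame_to_phase : List String) (out : List (String × List Int)) : Decidable (Spec_phase_to_frames_py available_frames frame_to_phase out) := by unfold Spec_phase_to_frames_py; infer_instance

-- ===== CLAIM (what is proved, stated in full; the proofs are below) =====
def Claim_equal_phase_to_frames_py : Prop := ∀ (available_frames : List Int) (frame_to_phase : List String), Dom_phase_to_frames_py available_frames frame_to_phase → Spec_phase_to_frames_py available_frames frame_to_phase (phase_to_frames_py available_frames frame_to_phase)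

-- ===== LEMMAS AND PROOFS =====

-- A's guarded fold over available_frames equals the unguarded grouping fold over the valid frames
-- (paired with their keys so the PySem grouping lemmas apply).
theorem pvFoldA_eq (available_frames : List Int) (frame_to_phase : List String) :
    (available_frames.foldl (fun by_phase frame =>
      if frame < 0 ∨ frame ≥ (frame_to_phase.length : Int) then by_phase
      else
        let p := PySem.List.pyGetD frame_to_phase frame ""
        let phase := if p = "" then "" else p
        by_phase.modify phase [] (fun l => l ++ [frame]))
      (PySem.Dict.empty : PySem.Dict String (List Int)))
    = ((available_frames.filter (fun f => 0 ≤ f && f < (frame_to_phase.length : Int))).map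
        (fun f => (pvKey frame_to_phase f, f))).foldl
        (fun d p => d.modify p.1 [] (fun l => l ++ [p.2])) PySem.Dict.empty := by
  rw [List.foldl_map, List.foldl_filter]
  apply PySem.List.foldl_congr_mem
  intro d f _
  by_cases h : f < 0 ∨ f ≥ (frame_to_phase.length : Int)
  · have : ¬ (0 ≤ f && f < (frame_to_phase.length : Int)) = true := by
      simp only [Bool.and_eq_true, decide_eq_true_eq]; omega
    simp [h, this]
  · have : (0 ≤ f && f < (frame_to_phase.length : Int)) = true := by
      simp only [Bool.and_eq_true, decide_eq_true_eq]; omega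
    simp [h, this, pvKey]

theorem phase_to_frames_eq (available_frames : List Int) (frame_to_phase : List String) :
    phase_to_frames_py available_frames frame_to_phase
      = phase_to_frames_py_alt available_frames frame_to_phase := by
  unfold phase_to_frames_py phase_to_frames_py_alt
  rw [pvFoldA_eq]
  set valid := available_frames.filter (fun f => 0 ≤ f && f < (frame_to_phase.length : Int)) with hvalid
  set l := valid.map (fun f => (pvKey frame_to_phase f, f)) with hl
  set D := l.foldl (fun d p => d.modify p.1 [] (fun xs => xs ++ [p.2]))
            (PySem.Dict.empty : PySem.Dict String (List Int)) with hD
  have hnd : D.keys.Nodup := by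
    rw [hD, hl, List.foldl_map]
    exact PySem.Dict.nodup_keys_foldl_modify_key valid (pvKey frame_to_phase) []
      (fun _ f => fun xs => xs ++ [f]) _ PySem.Dict.nodup_keys_empty
  have hkeys : D.keys = PySem.List.dedup (valid.map (pvKey frame_to_phase)) := by
    rw [hD, hl, List.foldl_map]
    rw [PySem.Dict.keys_foldl_modify_key]
    simp [PySem.Set.update, PySem.Set.ofList_eq_foldl]
  have hget : ∀ k, D.getD k [] = valid.filter (fun f => pvKey frame_to_phase f == k) := by
    intro k
    rw [hD, PySem.Dict.getD_foldl_modify_append, hl]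
    simp [List.filter_map, List.map_map, Function.comp_def]
  rw [PySem.Dict.items_eq_map_keys D hnd [], hkeys]
  apply List.map_congr_left
  intro k _
  rw [hget k, hvalid, List.filter_filter]

-- ===== VERDICT (by name: the statement is the Claim_ definition above) =====
theorem phase_to_frames_py_spec : Claim_equal_phase_to_frames_py := by
  intro af ftp _
  unfold Spec_phase_to_frames_py
  exact phase_to_frames_eq af ftp
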